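-- pv_equiv track=rewrite | github.com/MisterSilvereagle/cryptions | playfair.py | __split_into_bigrams
-- ===== SOURCE A (Python) =====
-- def __split_into_bigrams(inp: list) -> list:
--     temp = []
--     _ = []
--     for m in inp:
--         if len(_) == 0:
--             _.append(m)
--         elif len(_) == 1:
--             if _[0] != m:
--                 _.append(m)
--                 temp.append(_)
--                 _ = []
--             elif _[0] != 'X':
--                 _.append('X')
--                 temp.append(_)
--                 _ = [m]
--             else:
--                 _.append('Q')
--                 temp.append(_)
--                 _ = [m]
--     if _ != []:
--         if _[0] != 'X':
--             _.append('X')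
--         else:
--             _.append('Q')
--         temp.append(_)
--         _ = []
--
--     return temp
-- ===== SOURCE B (Python) =====
-- def __split_into_bigrams(inp: list) -> list:
--     out = []
--     i = 0
--     n = len(inp)
--     while i < n:
--         a = inp[i]
--         if i + 1 < n and inp[i + 1] != a:
--             out.append([a, inp[i + 1]])
--             i += 2
--         else:
--             out.append([a, 'X' if a != 'X' else 'Q'])
--             i += 1
--     return out
-- ===== Notes on version B (the rewrite author's own statement) =====
-- stated objective: simpler
-- what changed: Replaces the stateful one-element pending buffer and separate end-of-loop flush with a single index loop using two-character lookahead that advances by 2 on a pair and by 1 on a repeat/trailing letter, unifying the padding rule into one branch.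
import Mathlib
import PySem

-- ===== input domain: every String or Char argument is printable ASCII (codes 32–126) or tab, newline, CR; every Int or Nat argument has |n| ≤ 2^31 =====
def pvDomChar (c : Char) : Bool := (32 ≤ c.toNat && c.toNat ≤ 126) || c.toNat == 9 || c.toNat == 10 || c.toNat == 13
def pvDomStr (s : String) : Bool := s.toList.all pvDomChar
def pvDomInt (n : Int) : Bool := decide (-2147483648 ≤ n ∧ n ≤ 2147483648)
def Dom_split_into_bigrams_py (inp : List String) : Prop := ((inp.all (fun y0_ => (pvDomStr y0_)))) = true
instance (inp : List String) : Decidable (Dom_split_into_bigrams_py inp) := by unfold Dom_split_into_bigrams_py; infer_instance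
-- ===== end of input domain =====

-- B replaces A's stateful one-element pending buffer plus end-of-loop flush by a single
-- index/lookahead loop with one unified padding branch (objective: simpler; same O(n) cost).

-- ===== PORT A =====
-- one step of A's for-loop: state = (temp, the pending buffer `_`)
def pvStepA (st : List (List String) × List String) (m : String) :
    List (List String) × List String :=
  match st with
  | (temp, u) =>
    if u.length == 0 then (temp, u ++ [m])
    else if u.length == 1 then
      if u.headD "" ≠ m then (temp ++ [u ++ [m]], [])
      else if u.headD "" ≠ "X" then (temp ++ [u ++ ["X"]], [m])
      else (temp ++ [u ++ ["Q"]], [m])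
    else st

def split_into_bigrams_py (inp : List String) : List (List String) :=
  match inp.foldl pvStepA ([], []) with
  | (temp, u) =>
    if u ≠ [] then
      if u.headD "" ≠ "X" then temp ++ [u ++ ["X"]]
      else temp ++ [u ++ ["Q"]]
    else temp

-- ===== PORT B =====
-- Source B's index loop with two-character lookahead, as structural recursion:
-- a pair consumes two elements, a repeat or trailing letter consumes one.
def split_into_bigrams_py_alt : List String → List (List String)
  | [] => []
  | a :: rest =>
    match rest with
    | b :: rest' =>
      if b ≠ a then [a, b] :: split_into_bigrams_py_alt rest'
      else [a, if a ≠ "X" then "X" else "Q"] :: split_into_bigrams_py_alt (b :: rest')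
    | [] => [[a, if a ≠ "X" then "X" else "Q"]]

-- ===== PRECONDITION & SPEC =====
def Spec_split_into_bigrams_py (inp : List String) (out : List (List String)) : Prop := out = split_into_bigrams_py_alt inp
instance (inp : List String) (out : List (List String)) : Decidable (Spec_split_into_bigrams_py inp out) := by unfold Spec_split_into_bigrams_py; infer_instance

-- ===== CLAIM (what is proved, stated in full; the proofs are below) =====
def Claim_equal_split_into_bigrams_py : Prop := ∀ (inp : List String), Dom_split_into_bigrams_py inp → Spec_split_into_bigrams_py inp (split_into_bigrams_py inp)

-- ===== LEMMAS AND PROOFS =====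
-- A's finishing step (the code after the for-loop), abstracted for the invariant
def pvFinishA (st : List (List String) × List String) : List (List String) :=
  match st with
  | (temp, u) =>
    if u ≠ [] then
      if u.headD "" ≠ "X" then temp ++ [u ++ ["X"]]
      else temp ++ [u ++ ["Q"]]
    else temp

-- Loop invariant for A's fold, for both reachable buffer states ([] and [a]):
-- finishing the fold yields the already-emitted temp followed by B's output.
theorem pvFoldA_invariant (l : List String) :
    (∀ temp : List (List String),
       pvFinishA (l.foldl pvStepA (temp, [])) = temp ++ split_into_bigrams_py_alt l) ∧
    (∀ (temp : List (List String)) (a : String),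
       pvFinishA (l.foldl pvStepA (temp, [a])) = temp ++ split_into_bigrams_py_alt (a :: l)) := by
  induction l with
  | nil =>
    constructor
    · intro temp; simp [pvFinishA, split_into_bigrams_py_alt]
    · intro temp a
      by_cases h : a = "X" <;> simp [pvFinishA, split_into_bigrams_py_alt, h]
  | cons b rest ih =>
    obtain ⟨ih0, ih1⟩ := ih
    constructor
    · intro temp
      have : pvStepA (temp, ([] : List String)) b = (temp, [b]) := by simp [pvStepA]
      rw [List.foldl_cons, this, ih1]
    · intro temp a
      by_cases hab : a = b
      · subst hab
        by_cases hX : a = "X"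
        · have : pvStepA (temp, [a]) a = (temp ++ [[a, "Q"]], [a]) := by
            simp [pvStepA, hX]
          rw [List.foldl_cons, this, ih1, List.append_assoc]
          simp [split_into_bigrams_py_alt, hX]
        · have : pvStepA (temp, [a]) a = (temp ++ [[a, "X"]], [a]) := by
            simp [pvStepA, hX]
          rw [List.foldl_cons, this, ih1, List.append_assoc]
          simp [split_into_bigrams_py_alt, hX]
      · have : pvStepA (temp, [a]) b = (temp ++ [[a, b]], []) := by
          simp [pvStepA, hab]
        rw [List.foldl_cons, this, ih0, List.append_assoc]
        simp [split_into_bigrams_py_alt, Ne.symm hab]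

-- ===== VERDICT (by name: the statement is the Claim_ definition above) =====
theorem split_into_bigrams_py_spec : Claim_equal_split_into_bigrams_py := by
  intro inp _
  show split_into_bigrams_py inp = split_into_bigrams_py_alt inp
  have h := (pvFoldA_invariant inp).1 []
  simpa [split_into_bigrams_py, pvFinishA] using h
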